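-- pv_equiv track=rewrite | github.com/SeanNG21/nft-tracer-app | backend/discovery/btf_skb_discoverer.py | _is_likely_skb_function
-- ===== SOURCE A (Python) =====
-- def _is_likely_skb_function(func_name: str) -> bool:
--     skb_patterns = [
--         '_skb_', 'skb_', '__skb',
--         '_rcv', '_xmit', '_transmit',
--         '_receive', '_forward',
--         'nf_', 'nft_', 'netif_',
--         'tcp_', 'udp_', 'ip_',
--     ]
--
--     return any(pattern in func_name for pattern in skb_patterns)
-- ===== SOURCE B (Python) =====
-- _BY_LEN = {
--     3: frozenset(('nf_', 'ip_')),
--     4: frozenset(('skb_', '_rcv', 'nft_', 'tcp_', 'udp_')),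
--     5: frozenset(('_skb_', '__skb', '_xmit')),
--     6: frozenset(('netif_',)),
--     8: frozenset(('_receive', '_forward')),
--     9: frozenset(('_transmit',)),
-- }
--
--
-- def _is_likely_skb_function(func_name: str) -> bool:
--     # One left-to-right scan: at each position check the slice of each
--     # pattern length against a set of patterns of that length.
--     for i in range(len(func_name)):
--         for length, pats in _BY_LEN.items():
--             if func_name[i:i + length] in pats:
--                 return True
--     return False
-- ===== Notes on version B (the rewrite author's own statement) =====
-- stated objective: alternative
-- what changed: A runs 14 independent substring scans ('pattern in func_name' per pattern); B makes a single left-to-right pass over the string, at each position testing the fixed-length slices against length-grouped frozensets of patterns.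
import Mathlib
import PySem

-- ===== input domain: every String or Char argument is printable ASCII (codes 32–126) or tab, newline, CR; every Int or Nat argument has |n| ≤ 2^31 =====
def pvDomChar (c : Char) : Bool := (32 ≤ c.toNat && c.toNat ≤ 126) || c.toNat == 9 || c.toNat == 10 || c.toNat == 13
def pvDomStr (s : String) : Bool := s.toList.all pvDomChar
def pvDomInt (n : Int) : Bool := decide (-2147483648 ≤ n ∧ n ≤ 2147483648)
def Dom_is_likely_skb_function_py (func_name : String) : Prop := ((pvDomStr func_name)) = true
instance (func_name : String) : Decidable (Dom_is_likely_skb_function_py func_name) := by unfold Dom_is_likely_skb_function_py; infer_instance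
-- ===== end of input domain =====

-- B replaces A's 14 independent substring scans by one left-to-right scan that
-- checks length-grouped pattern sets at each position (objective: alternative).

-- ===== PORT A =====
def is_likely_skb_function_py (func_name : String) : Bool :=
  let skb_patterns : List String :=
    ["_skb_", "skb_", "__skb",
     "_rcv", "_xmit", "_transmit",
     "_receive", "_forward",
     "nf_", "nft_", "netif_",
     "tcp_", "udp_", "ip_"]
  skb_patterns.any (fun pattern => PySem.Str.isIn pattern func_name)

-- ===== PORT B =====
-- the length-grouped pattern sets of Source B (frozensets of distinct literals)
def pvGrp3 : List (List Char) := ["nf_".toList, "ip_".toList]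
def pvGrp4 : List (List Char) := ["skb_".toList, "_rcv".toList, "nft_".toList, "tcp_".toList, "udp_".toList]
def pvGrp5 : List (List Char) := ["_skb_".toList, "__skb".toList, "_xmit".toList]
def pvGrp6 : List (List Char) := ["netif_".toList]
def pvGrp8 : List (List Char) := ["_receive".toList, "_forward".toList]
def pvGrp9 : List (List Char) := ["_transmit".toList]

-- the slice func_name[i:i+L] at the current position is s.take L on the suffix s
def pvHitAt (s : List Char) : Bool :=
  pvGrp3.contains (s.take 3) || pvGrp4.contains (s.take 4) ||
  pvGrp5.contains (s.take 5) || pvGrp6.contains (s.take 6) ||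
  pvGrp8.contains (s.take 8) || pvGrp9.contains (s.take 9)

-- the loop 'for i in range(len(func_name))' walked as the suffixes of the string
def pvScan : List Char → Bool
  | [] => false
  | c :: rest => pvHitAt (c :: rest) || pvScan rest

def is_likely_skb_function_py_alt (func_name : String) : Bool :=
  pvScan func_name.toList

-- ===== PRECONDITION & SPEC =====
def Spec_is_likely_skb_function_py (func_name : String) (out : Bool) : Prop := out = is_likely_skb_function_py_alt func_name
instance (func_name : String) (out : Bool) : Decidable (Spec_is_likely_skb_function_py func_name out) := by unfold Spec_is_likely_skb_function_py; infer_instance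

-- ===== CLAIM (what is proved, stated in full; the proofs are below) =====
def Claim_equal_is_likely_skb_function_py : Prop := ∀ (func_name : String), Dom_is_likely_skb_function_py func_name → Spec_is_likely_skb_function_py func_name (is_likely_skb_function_py func_name)

-- ===== LEMMAS AND PROOFS =====

-- A's pattern list, as char lists, for the proofs
def pvPats : List (List Char) :=
  ["_skb_".toList, "skb_".toList, "__skb".toList,
   "_rcv".toList, "_xmit".toList, "_transmit".toList,
   "_receive".toList, "_forward".toList,
   "nf_".toList, "nft_".toList, "netif_".toList,
   "tcp_".toList, "udp_".toList, "ip_".toList]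

theorem pv_take_pfx (t p : List Char) (n : Nat) (h : p.length = n) :
    (t.take n = p) ↔ p <+: t := by
  subst h
  rw [List.prefix_iff_eq_take]
  exact eq_comm

set_option maxHeartbeats 2000000 in
theorem pvHitAt_iff (s : List Char) :
    pvHitAt s = true ↔ ∃ p ∈ pvPats, p <+: s := by
  simp only [pvHitAt, pvGrp3, pvGrp4, pvGrp5, pvGrp6, pvGrp8, pvGrp9,
    List.contains_cons, List.contains_nil, Bool.or_eq_true, beq_iff_eq, Bool.false_eq_true,
    or_false]
  rw [pv_take_pfx s "nf_".toList 3 rfl, pv_take_pfx s "ip_".toList 3 rfl,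
    pv_take_pfx s "skb_".toList 4 rfl, pv_take_pfx s "_rcv".toList 4 rfl,
    pv_take_pfx s "nft_".toList 4 rfl, pv_take_pfx s "tcp_".toList 4 rfl,
    pv_take_pfx s "udp_".toList 4 rfl, pv_take_pfx s "_skb_".toList 5 rfl,
    pv_take_pfx s "__skb".toList 5 rfl, pv_take_pfx s "_xmit".toList 5 rfl,
    pv_take_pfx s "netif_".toList 6 rfl, pv_take_pfx s "_receive".toList 8 rfl,
    pv_take_pfx s "_forward".toList 8 rfl, pv_take_pfx s "_transmit".toList 9 rfl]
  simp only [pvPats, List.mem_cons, List.not_mem_nil, or_false, exists_eq_or_imp,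
    exists_eq_left]
  tauto

theorem pv_exists_drop_cons (p : List Char) (c : Char) (rest : List Char) :
    (∃ j : Nat, p <+: (c :: rest).drop j) ↔ (p <+: c :: rest ∨ ∃ j : Nat, p <+: rest.drop j) := by
  constructor
  · rintro ⟨j, hj⟩
    cases j with
    | zero => exact Or.inl hj
    | succ j => exact Or.inr ⟨j, hj⟩
  · rintro (h | ⟨j, hj⟩)
    · exact ⟨0, h⟩
    · exact ⟨j + 1, hj⟩

theorem pvScan_iff (s : List Char) :
    pvScan s = true ↔ ∃ p ∈ pvPats, ∃ j : Nat, p <+: s.drop j := by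
  induction s with
  | nil =>
      simp only [pvScan, Bool.false_eq_true, false_iff]
      rintro ⟨p, hp, j, hj⟩
      rw [List.drop_nil, List.prefix_nil] at hj
      subst hj
      simp [pvPats] at hp
  | cons c rest ih =>
      rw [show pvScan (c :: rest) = (pvHitAt (c :: rest) || pvScan rest) from rfl,
        Bool.or_eq_true, pvHitAt_iff, ih]
      constructor
      · rintro (⟨p, hp, hpre⟩ | ⟨p, hp, j, hj⟩)
        · exact ⟨p, hp, 0, hpre⟩
        · exact ⟨p, hp, j + 1, hj⟩
      · rintro ⟨p, hp, j, hj⟩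
        rcases (pv_exists_drop_cons p c rest).mp ⟨j, hj⟩ with h | h
        · exact Or.inl ⟨p, hp, h⟩
        · exact Or.inr ⟨p, hp, h⟩

-- ===== VERDICT (by name: the statement is the Claim_ definition above) =====
set_option maxHeartbeats 2000000 in
theorem is_likely_skb_function_py_spec : Claim_equal_is_likely_skb_function_py := by
  intro func_name _
  unfold Spec_is_likely_skb_function_py
  rw [Bool.eq_iff_iff]
  unfold is_likely_skb_function_py is_likely_skb_function_py_alt
  rw [pvScan_iff]
  simp only [List.any_eq_true, PySem.Str.isIn_eq,
    ← PySem.Chars.exists_prefix_drop_iff_isIn]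
  constructor
  · rintro ⟨p, hp, j, hj⟩
    refine ⟨p.toList, ?_, j, hj⟩
    fin_cases hp <;> simp [pvPats]
  · rintro ⟨p, hp, j, hj⟩
    simp only [pvPats, List.mem_cons, List.not_mem_nil, or_false] at hp
    rcases hp with h|h|h|h|h|h|h|h|h|h|h|h|h|h <;> subst h <;>
      exact ⟨_, by simp, j, hj⟩
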